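-- pv_equiv track=rewrite | github.com/SX-Aurora/mpi4py-ve | demo/thermal/thermal.py | get_count_and_displs
-- ===== SOURCE A (Python) =====
-- NZ = 100               # The number of grid points in Z-direction.
--
-- def get_count_and_displs(rank, size):
--     offset = 0
--     count = []
--     displs = []
--     for r in range(size):
--         lz_s = NZ * r // size
--         lz_e = NZ * (r + 1) // size
--         count.append(lz_e - lz_s + 2)
--         displs.append(lz_s)
--     return count, displs
-- ===== SOURCE B (Python) =====
-- NZ = 100               # The number of grid points in Z-direction.
--
-- def get_count_and_displs(rank, size):
--     # Bresenham-style block distribution: one divmod up front, then a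
--     # running remainder decides which ranks get an extra grid point;
--     # no per-iteration division at all.
--     count = []
--     displs = []
--     if size <= 0:
--         return count, displs
--     q, m = divmod(NZ, size)
--     d = 0
--     rem = 0
--     for _ in range(size):
--         displs.append(d)
--         rem += m
--         if rem >= size:
--             step = q + 1
--             rem -= size
--         else:
--             step = q
--         count.append(step + 2)
--         d += step
--     return count, displs
-- ===== Notes on version B (the rewrite author's own statement) =====
-- stated objective: alternative
-- what changed: B replaces A's two floor divisions per rank by a Bresenham-style block distribution: one divmod(NZ, size) up front, then a running remainder accumulator decides which ranks receive an extra grid point, building displacements by accumulation instead of division.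
import Mathlib
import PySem

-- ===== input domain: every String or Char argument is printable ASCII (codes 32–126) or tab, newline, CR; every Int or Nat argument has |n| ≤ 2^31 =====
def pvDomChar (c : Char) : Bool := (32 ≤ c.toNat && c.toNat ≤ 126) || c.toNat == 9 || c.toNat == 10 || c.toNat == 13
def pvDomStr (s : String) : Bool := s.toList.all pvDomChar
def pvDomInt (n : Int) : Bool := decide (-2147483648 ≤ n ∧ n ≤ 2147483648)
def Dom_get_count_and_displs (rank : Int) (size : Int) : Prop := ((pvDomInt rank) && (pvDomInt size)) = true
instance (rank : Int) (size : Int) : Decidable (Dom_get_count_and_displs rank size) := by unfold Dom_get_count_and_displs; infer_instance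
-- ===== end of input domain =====

-- B replaces the two floor divisions A performs per rank by one divmod up
-- front and a Bresenham-style running remainder that decides which ranks get
-- an extra grid point; displacements are built by accumulation.

-- ===== PORT A =====
def get_count_and_displs (rank : Int) (size : Int) : List Int × List Int :=
  -- offset = 0 is assigned and never used in A; omitted
  (PySem.List.pyRange 0 size 1).foldl
    (fun (st : List Int × List Int) r =>
      let lz_s := PySem.Int.floordiv (100 * r) size
      let lz_e := PySem.Int.floordiv (100 * (r + 1)) size
      (st.1 ++ [lz_e - lz_s + 2], st.2 ++ [lz_s]))
    ([], [])

-- ===== PORT B =====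
-- one iteration of Source B's loop body over the state (count, displs, d, rem)
def get_count_and_displs_step (size q m : Int)
    (st : List Int × List Int × Int × Int) : List Int × List Int × Int × Int :=
  match st with
  | (count, displs, d, rem) =>
    let displs := displs ++ [d]
    let rem := rem + m
    if rem ≥ size then (count ++ [q + 1 + 2], displs, d + (q + 1), rem - size)
    else (count ++ [q + 2], displs, d + q, rem)

def get_count_and_displs_alt (rank : Int) (size : Int) : List Int × List Int :=
  if size ≤ 0 then ([], [])
  else
    let q := PySem.Int.floordiv 100 size
    let m := PySem.Int.mod 100 size
    let st := (PySem.List.pyRange 0 size 1).foldl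
      (fun st _ => get_count_and_displs_step size q m st) ([], [], 0, 0)
    (st.1, st.2.1)

-- ===== PRECONDITION & SPEC =====
def Spec_get_count_and_displs (rank : Int) (size : Int) (out : List Int × List Int) : Prop := out = get_count_and_displs_alt rank size
instance (rank : Int) (size : Int) (out : List Int × List Int) : Decidable (Spec_get_count_and_displs rank size out) := by unfold Spec_get_count_and_displs; infer_instance

-- ===== CLAIM (what is proved, stated in full; the proofs are below) =====
def Claim_equal_get_count_and_displs : Prop := ∀ (rank : Int) (size : Int), Dom_get_count_and_displs rank size → Spec_get_count_and_displs rank size (get_count_and_displs rank size)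

-- ===== LEMMAS AND PROOFS =====

-- A's foldl with two append accumulators is a pair of maps.
theorem pvFoldA (size : Int) (L : List Int) (c d : List Int) :
    L.foldl
      (fun (st : List Int × List Int) r =>
        let lz_s := PySem.Int.floordiv (100 * r) size
        let lz_e := PySem.Int.floordiv (100 * (r + 1)) size
        (st.1 ++ [lz_e - lz_s + 2], st.2 ++ [lz_s])) (c, d)
    = (c ++ L.map (fun r => PySem.Int.floordiv (100 * (r + 1)) size
                            - PySem.Int.floordiv (100 * r) size + 2),
       d ++ L.map (fun r => PySem.Int.floordiv (100 * r) size)) := by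
  induction L generalizing c d with
  | nil => simp
  | cons x xs ih => simp [List.foldl_cons, ih, List.append_assoc]

-- a fold whose body ignores the element is an iterate
theorem pvFoldlConst {α σ : Type} (g : σ → σ) (L : List α) (s : σ) :
    L.foldl (fun st _ => g st) s = g^[L.length] s := by
  induction L generalizing s with
  | nil => rfl
  | cons x xs ih => simp [List.foldl_cons, ih, Function.iterate_succ_apply]

-- one division step: how floordiv/mod of 100*(k+1) follow from those of 100*k
theorem pvStepArith (size k : Int) (hs : 0 < size) :
    (PySem.Int.mod (100 * k) size + PySem.Int.mod 100 size ≥ size →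
      PySem.Int.floordiv (100 * (k + 1)) size
        = PySem.Int.floordiv (100 * k) size + PySem.Int.floordiv 100 size + 1 ∧
      PySem.Int.mod (100 * (k + 1)) size
        = PySem.Int.mod (100 * k) size + PySem.Int.mod 100 size - size) ∧
    (¬ PySem.Int.mod (100 * k) size + PySem.Int.mod 100 size ≥ size →
      PySem.Int.floordiv (100 * (k + 1)) size
        = PySem.Int.floordiv (100 * k) size + PySem.Int.floordiv 100 size ∧
      PySem.Int.mod (100 * (k + 1)) size
        = PySem.Int.mod (100 * k) size + PySem.Int.mod 100 size) := by
  have hk := PySem.Int.floordiv_mul_add_mod (100 * k) size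
  have h1 := PySem.Int.floordiv_mul_add_mod 100 size
  have hk0 := PySem.Int.mod_nonneg (100 * k) hs
  have hk1 := PySem.Int.mod_lt (100 * k) hs
  have h10 := PySem.Int.mod_nonneg 100 hs
  have h11 := PySem.Int.mod_lt 100 hs
  have hsum := PySem.Int.floordiv_mul_add_mod (100 * (k + 1)) size
  have hs0 := PySem.Int.mod_nonneg (100 * (k + 1)) hs
  have hs1 := PySem.Int.mod_lt (100 * (k + 1)) hs
  constructor
  · intro hge
    have hf : PySem.Int.floordiv (100 * (k + 1)) size
        = PySem.Int.floordiv (100 * k) size + PySem.Int.floordiv 100 size + 1 := by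
      rw [PySem.Int.floordiv_eq_iff_of_pos hs]
      constructor <;> nlinarith
    exact ⟨hf, by nlinarith [hf, hsum]⟩
  · intro hlt
    have hf : PySem.Int.floordiv (100 * (k + 1)) size
        = PySem.Int.floordiv (100 * k) size + PySem.Int.floordiv 100 size := by
      rw [PySem.Int.floordiv_eq_iff_of_pos hs]
      constructor <;> nlinarith
    exact ⟨hf, by nlinarith [hf, hsum]⟩

-- invariant of B's loop: after n iterations the state is the first n counts,
-- the first n displacements, floordiv(100n, size) and mod(100n, size)
theorem pvIterB (size : Int) (hs : 0 < size) (n : Nat) :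
    (get_count_and_displs_step size (PySem.Int.floordiv 100 size)
        (PySem.Int.mod 100 size))^[n] ([], [], 0, 0)
    = ((List.range n).map (fun (k : Nat) =>
          PySem.Int.floordiv (100 * ((k : Int) + 1)) size
            - PySem.Int.floordiv (100 * (k : Int)) size + 2),
       (List.range n).map (fun (k : Nat) => PySem.Int.floordiv (100 * (k : Int)) size),
       PySem.Int.floordiv (100 * (n : Int)) size,
       PySem.Int.mod (100 * (n : Int)) size) := by
  induction n with
  | zero =>
    have h0 : PySem.Int.floordiv 0 size = 0 := by
      rw [PySem.Int.floordiv_eq_iff_of_pos hs]; omega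
    have h0' : PySem.Int.mod 0 size = 0 := by
      have := PySem.Int.floordiv_mul_add_mod 0 size
      rw [h0] at this; omega
    simp [h0, h0']
  | succ n ih =>
    rw [Function.iterate_succ_apply', ih]
    have harith := pvStepArith size (n : Int) hs
    rw [get_count_and_displs_step]
    by_cases hge : PySem.Int.mod (100 * (n : Int)) size + PySem.Int.mod 100 size ≥ size
    · obtain ⟨hf, hm⟩ := harith.1 hge
      simp only [if_pos hge, List.range_succ, List.map_append, List.map_cons, List.map_nil,
        Prod.mk.injEq]
      refine ⟨?_, trivial, ?_, ?_⟩
      · congr 1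
        simp only [List.cons.injEq, and_true]
        rw [hf]; ring
      · push_cast [hf]; ring
      · push_cast [hm]; ring
    · obtain ⟨hf, hm⟩ := harith.2 hge
      simp only [if_neg hge, List.range_succ, List.map_append, List.map_cons, List.map_nil,
        Prod.mk.injEq]
      refine ⟨?_, trivial, ?_, ?_⟩
      · congr 1
        simp only [List.cons.injEq, and_true]
        rw [hf]; ring
      · push_cast [hf]; ring
      · push_cast [hm]; ring

theorem get_count_and_displs_eq (rank size : Int) :
    get_count_and_displs rank size = get_count_and_displs_alt rank size := by
  unfold get_count_and_displs get_count_and_displs_alt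
  rw [pvFoldA]
  by_cases hs : size ≤ 0
  · rw [if_pos hs, PySem.List.pyRange_one_eq_nil (by omega)]; simp
  · rw [if_neg hs]
    have hspos : 0 < size := by omega
    show _ = ((((PySem.List.pyRange 0 size 1).foldl
        (fun st _ => get_count_and_displs_step size (PySem.Int.floordiv 100 size)
          (PySem.Int.mod 100 size) st) ([], [], 0, 0)).1),
      (((PySem.List.pyRange 0 size 1).foldl
        (fun st _ => get_count_and_displs_step size (PySem.Int.floordiv 100 size)
          (PySem.Int.mod 100 size) st) ([], [], 0, 0)).2.1))
    rw [pvFoldlConst, PySem.List.length_pyRange_one, sub_zero, pvIterB size hspos]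
    have hrange : PySem.List.pyRange 0 size 1
        = (List.range size.toNat).map (fun (k : Nat) => (k : Int)) := by
      rw [PySem.List.pyRange_one]
      simp [List.map_eq_flatMap]
    rw [hrange]
    simp [List.map_map, Function.comp]

-- ===== VERDICT (by name: the statement is the Claim_ definition above) =====
theorem get_count_and_displs_spec : Claim_equal_get_count_and_displs := by
  intro rank size _
  exact get_count_and_displs_eq rank size
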